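-- pv_equiv track=rewrite | github.com/ewdlop/DataStructure-Algorithm-Note | Python/PigeonholePrinciple.py | find_same_sum_subsequence
-- ===== SOURCE A (Python) =====
-- from typing import List, Set, Dict, Tuple, Any, Optional
--
-- def find_same_sum_subsequence(arr: List[int]) -> Tuple[List[int], List[int]]:
--     """
--     Find two different subsequences with the same sum
--     Uses pigeonhole: if n numbers taken from range [1,m],
--     there must be two with same sum if n > m
--     """
--     n = len(arr)
--     # Generate all possible subsequences sums
--     sums = {}  # sum -> subsequence mapping
--
--     # We'll use binary representation to generate subsequences
--     for mask in range(1, 2**n):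
--         subsequence = []
--         total = 0
--         for i in range(n):
--             if mask & (1 << i):
--                 subsequence.append(arr[i])
--                 total += arr[i]
--
--         if total in sums:
--             # Found two subsequences with same sum
--             return sums[total], subsequence
--         sums[total] = subsequence
--
--     return [], []
-- ===== SOURCE B (Python) =====
-- def _low_index(mask):
--     # lowest set bit index of mask (mask >= 1)
--     return 0 if mask % 2 == 1 else 1 + _low_index(mask // 2)
--
-- def _build(arr, mask):
--     return [x for i, x in enumerate(arr) if (mask >> i) & 1]
--
-- def find_same_sum_subsequence(arr):
--     n = len(arr)
--     sums = {0: 0}  # mask -> sum of the elements it selects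
--     seen = {}      # sum -> first mask that produced it
--     for mask in range(1, 1 << n):
--         s = sums[mask & (mask - 1)] + arr[_low_index(mask)]
--         sums[mask] = s
--         if s in seen:
--             return _build(arr, seen[s]), _build(arr, mask)
--         seen[s] = mask
--     return [], []
-- ===== Notes on version B (the rewrite author's own statement) =====
-- stated objective: faster
-- what changed: B replaces A's O(n) inner rebuild per mask by an incremental DP (sum[mask] = sum[mask & (mask-1)] + arr[lowbit]), stores only the mask per sum and materialises the two subsequences once at return.
import Mathlib
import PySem

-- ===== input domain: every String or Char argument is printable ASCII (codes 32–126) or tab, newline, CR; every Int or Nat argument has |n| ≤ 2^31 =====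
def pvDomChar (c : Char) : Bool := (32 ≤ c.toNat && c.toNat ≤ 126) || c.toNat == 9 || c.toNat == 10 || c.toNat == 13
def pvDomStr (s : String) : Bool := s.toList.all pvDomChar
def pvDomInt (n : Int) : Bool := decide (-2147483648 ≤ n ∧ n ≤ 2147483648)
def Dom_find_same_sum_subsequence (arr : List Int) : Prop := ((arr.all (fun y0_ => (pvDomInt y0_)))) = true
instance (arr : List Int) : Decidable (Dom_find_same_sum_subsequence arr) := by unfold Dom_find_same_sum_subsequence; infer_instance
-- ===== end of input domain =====

-- B replaces A's O(n) inner subsequence rebuild per mask by an incremental sum DP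
-- (sum[mask] = sum[mask & (mask-1)] + arr[lowbit]); the two subsequences are built once at return.

-- ===== PORT A =====
-- inner 'for i in range(n)' loop of A: builds (subsequence, total) for one mask
def aInner (arr : List Int) (mask : Nat) : List Int × Int :=
  (List.range arr.length).foldl
    (fun st i =>
      if mask &&& (1 <<< i) ≠ 0 then (st.1 ++ [arr.getD i 0], st.2 + arr.getD i 0) else st)
    ([], 0)

-- 'for mask in range(1, 2**n)' with early return; arr[i] is always in range, getD is exact
def aLoop (arr : List Int) (sums : PySem.Dict Int (List Int)) : List Nat → List Int × List Int
  | [] => ([], [])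
  | m :: ms =>
    let p := aInner arr m
    match sums.get? p.2 with
    | some prev => (prev, p.1)
    | none => aLoop arr (sums.insert p.2 p.1) ms

def find_same_sum_subsequence (arr : List Int) : List Int × List Int :=
  aLoop arr PySem.Dict.empty (List.range' 1 (2 ^ arr.length - 1))

-- ===== PORT B =====
-- recursive _low_index of Source B; the 0 branch is a totality guard (Source B only calls it with mask ≥ 1)
def bLowIndex : Nat → Nat
  | 0 => 0
  | m + 1 => if (m + 1) % 2 = 1 then 0 else 1 + bLowIndex ((m + 1) / 2)

-- _build of Source B: [x for i, x in enumerate(arr) if (mask >> i) & 1]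
def bBuild (arr : List Int) (mask : Nat) : List Int :=
  ((PySem.List.enumerate arr).filter (fun p => (mask >>> p.1.toNat) &&& 1 ≠ 0)).map (·.2)

-- main loop of Source B; sums[mask & (mask-1)] is always present (that mask was processed earlier
-- or is the initial key 0), so getD's default is never used
def bLoop (arr : List Int) (sums : PySem.Dict Nat Int) (seen : PySem.Dict Int Nat) :
    List Nat → List Int × List Int
  | [] => ([], [])
  | m :: ms =>
    let s := sums.getD (m &&& (m - 1)) 0 + arr.getD (bLowIndex m) 0
    let sums' := sums.insert m s
    match seen.get? s with
    | some prev => (bBuild arr prev, bBuild arr m)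
    | none => bLoop arr sums' (seen.insert s m) ms

def find_same_sum_subsequence_alt (arr : List Int) : List Int × List Int :=
  bLoop arr (PySem.Dict.empty.insert 0 0) PySem.Dict.empty (List.range' 1 (2 ^ arr.length - 1))

-- ===== PRECONDITION & SPEC =====
def Spec_find_same_sum_subsequence (arr : List Int) (out : List Int × List Int) : Prop := out = find_same_sum_subsequence_alt arr
instance (arr : List Int) (out : List Int × List Int) : Decidable (Spec_find_same_sum_subsequence arr out) := by unfold Spec_find_same_sum_subsequence; infer_instance

-- ===== CLAIM (what is proved, stated in full; the proofs are below) =====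
def Claim_equal_find_same_sum_subsequence : Prop := ∀ (arr : List Int), Dom_find_same_sum_subsequence arr → Spec_find_same_sum_subsequence arr (find_same_sum_subsequence arr)

-- ===== LEMMAS AND PROOFS =====

-- the subsequence selected by a mask, and its sum, in spec form
def subOf (arr : List Int) (m : Nat) : List Int :=
  ((List.range arr.length).filter (fun i => m.testBit i)).map (fun i => arr.getD i 0)

def sumOf (arr : List Int) (m : Nat) : Int :=
  ∑ i ∈ Finset.range arr.length, if m.testBit i then arr.getD i 0 else 0

lemma and_shift_ne_iff (m i : Nat) : (m &&& (1 <<< i) ≠ 0) ↔ m.testBit i = true := by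
  rw [Nat.shiftLeft_eq, one_mul]
  constructor
  · intro h; by_contra hb
    apply h
    apply Nat.zero_of_testBit_eq_false
    intro j
    rw [Nat.testBit_land]
    by_cases hij : j = i
    · subst hij; simp [hb]
    · simp [Nat.testBit_two_pow_of_ne (fun he => hij he.symm)]
  · intro h h0
    have h2 : (m &&& 2 ^ i).testBit i = true := by
      rw [Nat.testBit_land, h, Nat.testBit_two_pow_self]; rfl
    rw [h0] at h2; simp at h2

lemma shift_and_one_ne_iff (m i : Nat) : ((m >>> i) &&& 1 ≠ 0) ↔ m.testBit i = true := by
  simp [Nat.testBit, Nat.land_comm]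

-- A's inner fold computes (subOf, its sum)
lemma aInner_fold (arr : List Int) (mask : Nat) :
    ∀ (l : List Nat) (acc : List Int × Int),
      l.foldl (fun st i =>
        if mask &&& (1 <<< i) ≠ 0 then (st.1 ++ [arr.getD i 0], st.2 + arr.getD i 0) else st) acc
      = (acc.1 ++ ((l.filter (fun i => mask.testBit i)).map (fun i => arr.getD i 0)),
         acc.2 + (((l.filter (fun i => mask.testBit i)).map (fun i => arr.getD i 0)).sum)) := by
  intro l
  induction l with
  | nil => intro acc; simp
  | cons x xs ih =>
    intro acc
    simp only [List.foldl_cons]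
    by_cases hx : mask &&& (1 <<< x) ≠ 0
    · have hb : mask.testBit x = true := (and_shift_ne_iff mask x).mp hx
      rw [if_pos hx, ih]
      simp only [List.filter_cons, hb, if_pos, List.map_cons, List.sum_cons]
      simp [List.append_assoc, add_assoc]
    · have hb : ¬ mask.testBit x = true := fun h => hx ((and_shift_ne_iff mask x).mpr h)
      rw [if_neg hx, ih]
      simp [hb]

lemma sum_filter_range (g : Nat → Int) (p : Nat → Bool) :
    ∀ n : Nat, (((List.range n).filter p).map g).sum
      = ∑ i ∈ Finset.range n, if p i then g i else 0 := by
  intro n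
  induction n with
  | zero => simp
  | succ k ih =>
    rw [List.range_succ, Finset.sum_range_succ, List.filter_append, List.map_append,
        List.sum_append, ih]
    by_cases hp : p k <;> simp [hp]

lemma aInner_eq (arr : List Int) (mask : Nat) :
    aInner arr mask = (subOf arr mask, sumOf arr mask) := by
  unfold aInner subOf sumOf
  rw [aInner_fold]
  simp [sum_filter_range]

-- bBuild equals subOf (enumerate-with-filter vs range-with-filter)
lemma enumerate_filter_map (q : Nat → Bool) :
    ∀ (arr : List Int) (s : Nat),
      ((PySem.List.enumerate arr (s : Int)).filter (fun p => q p.1.toNat)).map (·.2)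
        = ((List.range arr.length).filter (fun i => q (s + i))).map (fun i => arr.getD i 0) := by
  intro arr
  induction arr with
  | nil => intro s; simp [PySem.List.enumerate_nil]
  | cons x xs ih =>
    intro s
    rw [PySem.List.enumerate_cons,
        show ((s : Int) + 1) = ((s + 1 : Nat) : Int) by push_cast; ring,
        List.filter_cons]
    rw [show List.range (x :: xs).length = 0 :: (List.range xs.length).map (· + 1) by
          simp [List.range_succ_eq_map],
        List.filter_cons]
    have hts : ((s : Int)).toNat = s := Int.toNat_natCast s
    simp only [hts, Nat.add_zero]
    have tail :
        ((((List.range xs.length).map (· + 1)).filter (fun i => q (s + i))).map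
            (fun i => (x :: xs).getD i 0))
          = ((List.range xs.length).filter (fun j => q ((s + 1) + j))).map
              (fun j => xs.getD j 0) := by
      rw [List.filter_map, List.map_map]
      rw [List.filter_congr (l := List.range xs.length)
            (q := fun j => q ((s + 1) + j))
            (by intro j _
                show q (s + (j + 1)) = q ((s + 1) + j)
                rw [show s + (j + 1) = (s + 1) + j from by omega])]
      apply List.map_congr_left
      intro j _
      show (x :: xs).getD (j + 1) 0 = xs.getD j 0
      simp [List.getD]
    by_cases h0 : q s = true
    · rw [if_pos h0, if_pos h0]
      simp only [List.map_cons]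
      rw [ih (s + 1), tail]
      rfl
    · rw [if_neg h0, if_neg h0]
      rw [ih (s + 1), tail]

lemma bBuild_eq (arr : List Int) (mask : Nat) : bBuild arr mask = subOf arr mask := by
  unfold bBuild subOf
  have hpred : ∀ i : Nat, (decide ((mask >>> i) &&& 1 ≠ 0)) = mask.testBit i := by
    intro i
    by_cases h : mask.testBit i = true
    · simp [h]
    · have h2 : ¬ ((mask >>> i) &&& 1 ≠ 0) := fun hne => h ((shift_and_one_ne_iff mask i).mp hne)
      rw [decide_eq_false h2, eq_comm, ← Bool.not_eq_true]
      exact h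
  have h := enumerate_filter_map (fun i => decide ((mask >>> i) &&& 1 ≠ 0)) arr 0
  rw [show ((0 : Nat) : Int) = (0 : Int) by norm_num] at h
  rw [h]
  congr 1
  apply List.filter_congr
  intro i _
  simp only [Nat.zero_add]
  exact hpred i

-- low-bit lemmas
lemma bLowIndex_succ (k : Nat) :
    bLowIndex (k + 1) = if (k + 1) % 2 = 1 then 0 else 1 + bLowIndex ((k + 1) / 2) := by
  rw [bLowIndex]

lemma bLowIndex_testBit : ∀ m : Nat, 0 < m → m.testBit (bLowIndex m) = true := by
  intro m
  induction m using Nat.strong_induction_on with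
  | _ m ih =>
    intro hm
    match m, hm with
    | k + 1, _ =>
      rw [bLowIndex_succ]
      by_cases hodd : (k + 1) % 2 = 1
      · rw [if_pos hodd, Nat.testBit_zero]
        simp [hodd]
      · have hpos : 0 < (k + 1) / 2 := by omega
        have hlt : (k + 1) / 2 < k + 1 := by omega
        rw [if_neg hodd, Nat.add_comm 1 (bLowIndex ((k + 1) / 2)), Nat.testBit_succ]
        exact ih _ hlt hpos

lemma and_pred_testBit : ∀ m : Nat, 0 < m → ∀ i : Nat,
    (m &&& (m - 1)).testBit i = (m.testBit i && decide (i ≠ bLowIndex m)) := by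
  intro m
  induction m using Nat.strong_induction_on with
  | _ m ih =>
    intro hm i
    match m, hm with
    | k + 1, _ =>
      rw [Nat.testBit_land]
      by_cases hodd : (k + 1) % 2 = 1
      · -- odd: low bit is 0; k+1-1 = k is even with k/2 = (k+1)/2
        have hlow : bLowIndex (k + 1) = 0 := by rw [bLowIndex_succ, if_pos hodd]
        rw [hlow]
        cases i with
        | zero =>
          have hz : (k + 1 - 1).testBit 0 = false := by
            rw [Nat.testBit_zero]
            simp
            omega
          simp
          omega
        | succ j =>
          have h1 : (k + 1 - 1).testBit (j + 1) = ((k + 1) / 2).testBit j := by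
            rw [Nat.testBit_succ]
            congr 1
            omega
          rw [h1, Nat.testBit_succ]
          simp
      · -- even: recurse on (k+1)/2
        have hq : 0 < (k + 1) / 2 := by omega
        have hlt : (k + 1) / 2 < k + 1 := by omega
        have hlow : bLowIndex (k + 1) = 1 + bLowIndex ((k + 1) / 2) := by
          rw [bLowIndex_succ, if_neg hodd]
        rw [hlow]
        cases i with
        | zero =>
          have hz : (k + 1).testBit 0 = false := by
            rw [Nat.testBit_zero]
            simp
            omega
          simp [hz]
        | succ j =>
          have h1 : (k + 1).testBit (j + 1) = ((k + 1) / 2).testBit j := Nat.testBit_succ _ _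
          have h2 : (k + 1 - 1).testBit (j + 1) = ((k + 1) / 2 - 1).testBit j := by
            rw [Nat.testBit_succ]
            congr 1
            omega
          rw [h1, h2]
          have h3 := ih _ hlt hq j
          rw [Nat.testBit_land] at h3
          rw [h3]
          have hne : (j + 1 ≠ 1 + bLowIndex ((k + 1) / 2)) ↔ (j ≠ bLowIndex ((k + 1) / 2)) := by
            omega
          simp [hne]

-- the incremental sum step
lemma sumOf_step (arr : List Int) (m : Nat) (hm : 0 < m) (hlt : m < 2 ^ arr.length) :
    sumOf arr m = sumOf arr (m &&& (m - 1)) + arr.getD (bLowIndex m) 0 := by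
  have htb : m.testBit (bLowIndex m) = true := bLowIndex_testBit m hm
  have hlown : bLowIndex m < arr.length := by
    by_contra h
    push_neg at h
    have hlow2 : m < 2 ^ bLowIndex m :=
      lt_of_lt_of_le hlt (Nat.pow_le_pow_right (by norm_num) h)
    rw [Nat.testBit_lt_two_pow hlow2] at htb
    exact Bool.false_ne_true htb
  unfold sumOf
  have hsplit : ∀ i ∈ Finset.range arr.length,
      (if m.testBit i then arr.getD i 0 else 0)
        = (if (m &&& (m - 1)).testBit i then arr.getD i 0 else 0)
          + (if i = bLowIndex m then arr.getD (bLowIndex m) 0 else 0) := by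
    intro i _
    rw [and_pred_testBit m hm i]
    by_cases hi : i = bLowIndex m
    · subst hi
      simp [htb]
    · simp [hi]
  rw [Finset.sum_congr rfl hsplit, Finset.sum_add_distrib]
  congr 1
  rw [Finset.sum_ite_eq' (Finset.range arr.length) (bLowIndex m)
        (fun _ => arr.getD (bLowIndex m) 0)]
  simp [hlown]

-- main loop equivalence
lemma loop_eq (arr : List Int) : ∀ (cnt start : Nat), 1 ≤ start → start + cnt ≤ 2 ^ arr.length →
    ∀ (dA : PySem.Dict Int (List Int)) (sums : PySem.Dict Nat Int) (seen : PySem.Dict Int Nat),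
    (∀ k, k < start → sums.getD k 0 = sumOf arr k) →
    (∀ t, dA.get? t = (seen.get? t).map (bBuild arr)) →
    aLoop arr dA (List.range' start cnt) = bLoop arr sums seen (List.range' start cnt) := by
  intro cnt
  induction cnt with
  | zero => intro start _ _ dA sums seen _ _; simp [aLoop, bLoop]
  | succ c ih =>
    intro start hs hb dA sums seen Hsums Hseen
    rw [List.range'_succ]
    rw [aLoop, bLoop]
    have hm0 : 0 < start := hs
    have hmlt : start < 2 ^ arr.length := by omega
    have hrest : start &&& (start - 1) < start :=
      lt_of_le_of_lt Nat.and_le_right (by omega)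
    have hsum : sums.getD (start &&& (start - 1)) 0 + arr.getD (bLowIndex start) 0
        = sumOf arr start := by
      rw [Hsums _ hrest, ← sumOf_step arr start hm0 hmlt]
    rw [aInner_eq]
    simp only [hsum, Hseen (sumOf arr start)]
    cases hg : seen.get? (sumOf arr start) with
    | some prev =>
      simp [bBuild_eq]
    | none =>
      simp only [Option.map_none]
      apply ih (start + 1) (by omega) (by omega)
      · intro k hk
        rw [PySem.Dict.getD_insert]
        by_cases hks : k = start
        · subst hks; simp
        · simp [hks, Hsums k (by omega)]
      · intro t
        rw [PySem.Dict.get?_insert, PySem.Dict.get?_insert]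
        by_cases ht : t = sumOf arr start
        · simp [ht, bBuild_eq]
        · simp [ht, Hseen t]

lemma sumOf_zero (arr : List Int) : sumOf arr 0 = 0 := by
  unfold sumOf; simp

-- ===== VERDICT (by name: the statement is the Claim_ definition above) =====
theorem find_same_sum_subsequence_spec : Claim_equal_find_same_sum_subsequence := by
  intro arr _
  unfold Spec_find_same_sum_subsequence find_same_sum_subsequence find_same_sum_subsequence_alt
  apply loop_eq arr (2 ^ arr.length - 1) 1 (le_refl 1)
  · have : 1 ≤ 2 ^ arr.length := Nat.one_le_two_pow
    omega
  · intro k hk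
    interval_cases k
    rw [PySem.Dict.getD_insert]
    simp [sumOf_zero]
  · intro t
    simp [PySem.Dict.get?_empty]
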